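-- pv_equiv track=rewrite | github.com/cocokale/DiscoBERT | model/model_util.py | extract_n_grams
-- ===== SOURCE A (Python) =====
-- def extract_n_grams(inp_str, ngram: int = 3, connect_punc='_') -> set:
--     inp_list = inp_str.split(" ")
--     if len(inp_list) < 3:
--         return set()
--     tmp = []
--     for idx in range(len(inp_list) - ngram + 1):
--         this = [inp_list[idx + j] for j in range(ngram)]
--         tmp.append(connect_punc.join(this))
--     return set(tmp)
-- ===== SOURCE B (Python) =====
-- def extract_n_grams(inp_str, ngram: int = 3, connect_punc='_') -> set:
--     words = inp_str.split(" ")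
--     if len(words) < 3:
--         return set()
--     if not 0 < ngram <= len(words):
--         return set()
--     return {connect_punc.join(t) for t in zip(*(words[i:] for i in range(ngram)))}
-- ===== Notes on version B (the rewrite author's own statement) =====
-- stated objective: idiomatic
-- what changed: Windows are produced by zipping the ngram shifted views words[i:] in parallel (the standard zip-of-slices idiom) instead of indexing words[idx+j] in a nested loop, with an explicit window-count guard replacing the implicit empty range.
-- outside the precondition, e.g. on extract_n_grams('a b c', 0, '_'): A returns {''}, B returns set(); on extract_n_grams('a b c', -2, '_'): A returns {''}, B returns set()
import Mathlib
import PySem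

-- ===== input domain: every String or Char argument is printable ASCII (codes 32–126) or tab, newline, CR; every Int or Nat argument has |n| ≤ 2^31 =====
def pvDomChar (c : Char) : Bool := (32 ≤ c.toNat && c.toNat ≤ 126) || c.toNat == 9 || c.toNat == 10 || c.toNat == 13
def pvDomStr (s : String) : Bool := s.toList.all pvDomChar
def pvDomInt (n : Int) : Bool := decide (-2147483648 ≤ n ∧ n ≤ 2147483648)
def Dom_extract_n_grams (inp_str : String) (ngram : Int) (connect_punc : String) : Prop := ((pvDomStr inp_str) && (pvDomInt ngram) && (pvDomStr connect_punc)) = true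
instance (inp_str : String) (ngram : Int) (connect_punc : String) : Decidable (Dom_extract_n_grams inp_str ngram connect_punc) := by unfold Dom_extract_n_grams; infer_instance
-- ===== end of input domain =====

-- B builds the n-gram windows with the zip-of-shifted-slices idiom instead of A's nested index loop (idiomatic; same cost).

-- ===== PORT A =====
def extract_n_grams (inp_str : String) (ngram : Int) (connect_punc : String) : List String :=
  -- inp_str.split(" "): the separator is nonempty, so split? is always some
  let inp_list := (PySem.Str.split? inp_str " ").getD []
  if inp_list.length < 3 then PySem.Set.empty
  else
    let tmp := (PySem.List.pyRange 0 ((inp_list.length : Int) - ngram + 1) 1).foldl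
      (fun tmp idx =>
        -- inp_list[idx + j]: the index is always in range here, so pyGetD's default is never used
        let this := (PySem.List.pyRange 0 ngram 1).map (fun j => PySem.List.pyGetD inp_list (idx + j) "")
        tmp ++ [PySem.Str.join connect_punc this]) []
    PySem.Set.ofList tmp

-- ===== PORT B =====
-- zip(*lists) over lists of strings (truncating to the shortest, like Python's zip)
def pvZipN : List (List String) → List (List String)
  | [] => []
  | [l] => l.map (fun x => [x])
  | l :: l' :: ls => List.zipWith (· :: ·) l (pvZipN (l' :: ls))

def extract_n_grams_alt (inp_str : String) (ngram : Int) (connect_punc : String) : List String :=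
  let words := (PySem.Str.split? inp_str " ").getD []   -- separator nonempty: always some
  if words.length < 3 then PySem.Set.empty
  else if 0 < ngram ∧ ngram ≤ (words.length : Int) then
    let shifted := (PySem.List.pyRange 0 ngram 1).map (fun i => PySem.List.slice words (some i) none)
    PySem.Set.ofList ((pvZipN shifted).map (fun t => PySem.Str.join connect_punc t))
  else PySem.Set.empty

-- ===== PRECONDITION & SPEC =====
-- Pre_ excludes inputs with a nonpositive ngram and at least 3 space-separated words, a corner no caller
-- would specify: A returns a set holding one empty joined string there, while B returns the empty set.
def Pre_extract_n_grams (inp_str : String) (ngram : Int) (connect_punc : String) : Prop :=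
  1 ≤ ngram ∨ ((PySem.Str.split? inp_str " ").getD []).length < 3
instance (inp_str : String) (ngram : Int) (connect_punc : String) : Decidable (Pre_extract_n_grams inp_str ngram connect_punc) := by unfold Pre_extract_n_grams; infer_instance

def pvWitness_extract_n_grams : String × Int × String := ("a b c", 3, "_")

def Spec_extract_n_grams (inp_str : String) (ngram : Int) (connect_punc : String) (out : List String) : Prop := out = extract_n_grams_alt inp_str ngram connect_punc
instance (inp_str : String) (ngram : Int) (connect_punc : String) (out : List String) : Decidable (Spec_extract_n_grams inp_str ngram connect_punc out) := by unfold Spec_extract_n_grams; infer_instance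

-- ===== CLAIM (what is proved, stated in full; the proofs are below) =====
def Claim_equal_extract_n_grams : Prop := ∀ (inp_str : String) (ngram : Int) (connect_punc : String), Dom_extract_n_grams inp_str ngram connect_punc → Pre_extract_n_grams inp_str ngram connect_punc → Spec_extract_n_grams inp_str ngram connect_punc (extract_n_grams inp_str ngram connect_punc)

-- ===== LEMMAS AND PROOFS =====

-- A's inner comprehension over range(ngram) is the window (words.drop k).take n
lemma pv_inner_window (words : List String) (n : Nat) :
    ∀ (k : Nat), k + n ≤ words.length →
      (List.range n).map (fun j => words.getD (k + j) "") = (words.drop k).take n := by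
  induction n with
  | zero => intro k _; simp
  | succ n ih =>
      intro k hk
      rw [List.range_succ_eq_map, List.map_cons, List.map_map]
      have hklt : k < words.length := by omega
      have h1 : words.getD (k + 0) "" = words[k] := by
        simp [List.getD, hklt]
      have h2 : (List.range n).map ((fun j => words.getD (k + j) "") ∘ (· + 1))
          = (List.range n).map (fun j => words.getD ((k + 1) + j) "") := by
        apply List.map_congr_left; intro j _
        simp only [Function.comp]
        congr 1
        omega
      rw [h1, h2, ih (k + 1) (by omega)]
      rw [List.drop_eq_getElem_cons hklt, List.take_succ_cons]

-- zipN of the shifted views equals the list of windows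
lemma pv_zipN_windows (n : Nat) (hn : 1 ≤ n) :
    ∀ (ws : List String), n ≤ ws.length →
      pvZipN ((List.range n).map (fun i => ws.drop i))
        = (List.range (ws.length - n + 1)).map (fun k => (ws.drop k).take n) := by
  induction n with
  | zero => omega
  | succ n ih =>
      intro ws hlen
      rcases Nat.eq_zero_or_pos n with hn0 | hnpos
      · subst hn0
        simp only [Nat.zero_add, List.range_one, List.map_cons, List.map_nil, List.drop_zero, pvZipN]
        apply List.ext_getElem (by simp only [List.length_map, List.length_range]; omega)
        intro k h1 h2
        have hk : k < ws.length := by simpa using h1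
        simp only [List.getElem_map, List.getElem_range]
        rw [List.drop_eq_getElem_cons hk]
        rfl
      · rw [List.range_succ_eq_map, List.map_cons, List.map_map, List.drop_zero]
        have hshift : (List.range n).map ((fun i => ws.drop i) ∘ (· + 1))
            = (List.range n).map (fun i => (ws.drop 1).drop i) := by
          apply List.map_congr_left; intro i _
          simp [Function.comp]
        rw [hshift]
        obtain ⟨m, hm⟩ : ∃ m, n = m + 1 := ⟨n - 1, by omega⟩
        have hne : (List.range n).map (fun i => (ws.drop 1).drop i)
            = (ws.drop 1) :: (List.range m).map (fun i => (ws.drop 1).drop (i + 1)) := by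
          subst hm
          rw [List.range_succ_eq_map, List.map_cons, List.map_map]
          simp [Function.comp, Nat.add_comm]
        rw [hne,
          show pvZipN (ws :: (ws.drop 1) :: (List.range m).map (fun i => (ws.drop 1).drop (i + 1)))
              = List.zipWith (· :: ·) ws (pvZipN ((ws.drop 1) :: (List.range m).map (fun i => (ws.drop 1).drop (i + 1)))) from rfl,
          ← hne, ih hnpos (ws.drop 1) (by simp; omega)]
        have hlen1 : (ws.drop 1).length = ws.length - 1 := by simp
        apply List.ext_getElem
        · simp only [List.length_zipWith, List.length_map, List.length_range, hlen1]
          omega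
        · intro k h1 h2
          have hk : k < ws.length - n := by
            rw [List.length_zipWith, List.length_map, List.length_range, hlen1] at h1
            omega
          have hkws : k < ws.length := by omega
          rw [List.getElem_zipWith]
          simp only [List.getElem_map, List.getElem_range]
          rw [List.drop_drop, Nat.add_comm 1 k, List.drop_eq_getElem_cons hkws, List.take_succ_cons]

-- ===== VERDICT (by name: the statement is the Claim_ definition above) =====
theorem extract_n_grams_spec : Claim_equal_extract_n_grams := by
  intro inp_str ngram connect_punc _ hpre
  unfold Spec_extract_n_grams extract_n_grams extract_n_grams_alt
  set words := (PySem.Str.split? inp_str " ").getD [] with hw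
  by_cases hlen : words.length < 3
  · simp only [hlen, if_pos]
  · simp only [hlen, if_false]
    have hng : 1 ≤ ngram := by
      rcases hpre with h | h
      · exact h
      · rw [← hw] at h; omega
    obtain ⟨n, rfl⟩ : ∃ n : Nat, ngram = (n : Int) :=
      ⟨ngram.toNat, (Int.toNat_of_nonneg (by omega)).symm⟩
    have hn1 : 1 ≤ n := by exact_mod_cast hng
    by_cases hle : n ≤ words.length
    · have hcond : 0 < (n : Int) ∧ (n : Int) ≤ (words.length : Int) := by
        refine ⟨by exact_mod_cast hn1, by exact_mod_cast hle⟩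
      rw [if_pos hcond]
      have houter : (words.length : Int) - (n : Int) + 1 = ((words.length - n + 1 : Nat) : Int) := by
        push_cast [Nat.cast_sub hle]; ring
      rw [houter, PySem.List.pyRange_zero_natCast, PySem.List.pyRange_zero_natCast,
        PySem.List.foldl_append_singleton_eq_map, List.nil_append]
      simp only [List.map_map]
      congr 1
      have hslice : (List.range n).map ((fun i => PySem.List.slice words (some i) none) ∘ (fun k : Nat => (k : Int)))
          = (List.range n).map (fun i => words.drop i) := by
        apply List.map_congr_left; intro i _
        simp [Function.comp, PySem.List.slice_from_natCast]
      rw [hslice, pv_zipN_windows n hn1 words hle, List.map_map]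
      apply List.map_congr_left
      intro k hk
      simp only [List.mem_range] at hk
      simp only [Function.comp]
      congr 1
      have hcast : (List.range n).map ((fun j => PySem.List.pyGetD words (((k : Nat) : Int) + j) "") ∘ (fun j : Nat => (j : Int)))
          = (List.range n).map (fun j => words.getD (k + j) "") := by
        apply List.map_congr_left; intro j _
        have hs : ((k : Nat) : Int) + (j : Int) = ((k + j : Nat) : Int) := by push_cast; ring
        simp only [Function.comp, hs, PySem.List.pyGetD_natCast]
      rw [hcast, pv_inner_window words n k (by omega)]
    · have hgt : (words.length : Int) < (n : Int) := by exact_mod_cast Nat.lt_of_not_le hle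
      rw [if_neg (by rintro ⟨-, h2⟩; exact hle (by exact_mod_cast h2))]
      rw [PySem.List.pyRange_one_eq_nil (a := 0) (b := (words.length : Int) - (n : Int) + 1) (by omega)]
      rfl
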